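-- pv_equiv track=rewrite | github.com/NauGaika/RedBimTest | scripts/КР Регион.tab/Виды.panel/НомерВИмя.pushbutton/__init__.py | recur_add_c
-- ===== SOURCE A (Python) =====
-- def recur_add_c(name, names, title, part_name_not_split, c=1):
--     test_name = title.replace(part_name_not_split, name)
--     if test_name in names:
--         add_str = ' (' + to_str(c) + ')'
--         test_name = title.replace(part_name_not_split, name + add_str)
--         if test_name in names:
--             return recur_add_c(name, names,title, part_name_not_split, c=c+1)
--         else:
--             return test_name
--     return test_name
-- ===== SOURCE B (Python) =====
-- def to_str(x):
--     return str(x)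
--
-- def recur_add_c(name, names, title, part_name_not_split, c=1):
--     taken = set(names)
--     base = title.replace(part_name_not_split, name)
--     if base not in taken:
--         return base
--     # When the replacement actually changes the title, distinct counters give
--     # distinct candidates, so among len(names) + 2 candidates at most
--     # len(names) can be taken: this bounded scan always finds a free one.
--     for k in range(c, c + len(names) + 2):
--         candidate = title.replace(part_name_not_split, name + ' (' + to_str(k) + ')')
--         if candidate not in taken:
--             return candidate
-- ===== Notes on version B (the rewrite author's own statement) =====
-- stated objective: alternative
-- what changed: Replaces the unbounded recursion (which rebuilds and re-tests the suffix-less base name against the list at every level) with one base check against a precomputed set followed by a bounded for-loop over range(c, c+len(names)+2) of suffixed candidates; same candidate order and outputs.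
import Mathlib
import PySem

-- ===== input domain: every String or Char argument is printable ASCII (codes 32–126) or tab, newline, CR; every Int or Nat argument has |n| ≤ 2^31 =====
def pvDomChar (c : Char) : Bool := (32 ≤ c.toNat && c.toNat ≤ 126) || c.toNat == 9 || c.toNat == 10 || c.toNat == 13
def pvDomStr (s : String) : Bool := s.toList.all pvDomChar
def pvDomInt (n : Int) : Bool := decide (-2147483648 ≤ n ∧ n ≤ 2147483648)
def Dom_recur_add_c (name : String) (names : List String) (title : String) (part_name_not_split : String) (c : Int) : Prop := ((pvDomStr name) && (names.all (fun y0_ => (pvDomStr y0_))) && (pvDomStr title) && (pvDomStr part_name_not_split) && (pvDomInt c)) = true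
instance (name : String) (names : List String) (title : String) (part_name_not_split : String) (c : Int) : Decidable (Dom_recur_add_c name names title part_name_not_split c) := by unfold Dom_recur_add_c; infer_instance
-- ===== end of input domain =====

-- B replaces A's unbounded recursion (which rebuilds and re-tests the base name at every level) by
-- one base check against a precomputed set plus a bounded scan over a range of counters (objective:
-- alternative decomposition; same candidates in the same order).

-- ===== PORT A =====
-- A's recursion, transliterated level by level; the fuel argument only makes the recursion total
-- (it is never exhausted on inputs satisfying Pre_).
def pvARec (name : String) (names : List String) (title : String) (part : String) : Nat → Int → String
  | 0, _ => ""            -- fuel exhausted: unreachable on Pre_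
  | fuel + 1, c =>
    let test_name := PySem.Str.replace title part name
    if names.contains test_name then
      let add_str := " (" ++ PySem.Int.toStr c ++ ")"
      let test_name2 := PySem.Str.replace title part (name ++ add_str)
      if names.contains test_name2 then
        pvARec name names title part fuel (c + 1)
      else test_name2
    else test_name

def recur_add_c (name : String) (names : List String) (title : String) (part_name_not_split : String) (c : Int) : String :=
  pvARec name names title part_name_not_split (names.length + 2) c

-- ===== PORT B =====
-- B's bounded for-loop over the precomputed counter range; "" stands for Python's falling off the
-- end of the function (unreachable on Pre_: the candidates are pairwise distinct there).
def pvBScan (name : String) (taken : PySem.Set String) (title : String) (part : String) : List Int → String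
  | [] => ""
  | k :: ks =>
    let candidate := PySem.Str.replace title part (name ++ " (" ++ PySem.Int.toStr k ++ ")")
    if PySem.Set.contains taken candidate then pvBScan name taken title part ks
    else candidate

def recur_add_c_alt (name : String) (names : List String) (title : String) (part_name_not_split : String) (c : Int) : String :=
  let taken := PySem.Set.ofList names
  let base := PySem.Str.replace title part_name_not_split name
  if PySem.Set.contains taken base then
    pvBScan name taken title part_name_not_split
      (PySem.List.pyRange c (c + ((names.length : Int) + 2)) 1)
  else base

-- ===== PRECONDITION & SPEC =====
-- Pre_ excludes exactly the inputs on which A recurses forever (RecursionError): the base name is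
-- already taken and part_name_not_split does not occur in title, so every candidate equals the base.
def Pre_recur_add_c (name : String) (names : List String) (title : String) (part_name_not_split : String) (c : Int) : Prop :=
  names.contains (PySem.Str.replace title part_name_not_split name) = false
  ∨ PySem.Str.isIn part_name_not_split title = true

instance (name : String) (names : List String) (title : String) (part_name_not_split : String) (c : Int) : Decidable (Pre_recur_add_c name names title part_name_not_split c) := by unfold Pre_recur_add_c; infer_instance

def pvWitness_recur_add_c : String × List String × String × String × Int :=
  ("A", ["Plan A", "Plan A (1)"], "Plan X", "X", 1)

def Spec_recur_add_c (name : String) (names : List String) (title : String) (part_name_not_split : String) (c : Int) (out : String) : Prop := out = recur_add_c_alt name names title part_name_not_split c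
instance (name : String) (names : List String) (title : String) (part_name_not_split : String) (c : Int) (out : String) : Decidable (Spec_recur_add_c name names title part_name_not_split c out) := by unfold Spec_recur_add_c; infer_instance

-- ===== CLAIM =====
def Claim_equal_recur_add_c : Prop := ∀ (name : String) (names : List String) (title : String) (part_name_not_split : String) (c : Int), Dom_recur_add_c name names title part_name_not_split c → Pre_recur_add_c name names title part_name_not_split c → Spec_recur_add_c name names title part_name_not_split c (recur_add_c name names title part_name_not_split c)

-- ===== LEMMAS AND PROOFS =====

-- set(names) answers membership exactly like the list names.
theorem pvSet_contains (names : List String) (x : String) :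
    PySem.Set.contains (PySem.Set.ofList names) x = names.contains x := by
  by_cases h : x ∈ names
  · simp [PySem.Set.contains_eq_listContains, PySem.Set.mem_ofList, h]
  · simp [PySem.Set.contains_eq_listContains, PySem.Set.mem_ofList, h]

-- While the base name is taken, A's recursion with the given fuel visits exactly the counters
-- of the range of that length, in order, agreeing with B's scan.
theorem pvARec_eq_pvBScan (name : String) (names : List String) (title : String) (part : String)
    (hbase : names.contains (PySem.Str.replace title part name) = true) :
    ∀ (fuel : Nat) (c : Int),
      pvARec name names title part fuel c
        = pvBScan name (PySem.Set.ofList names) title part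
            (PySem.List.pyRange c (c + (fuel : Int)) 1) := by
  intro fuel
  induction fuel with
  | zero =>
    intro c
    rw [PySem.List.pyRange_one_eq_nil (by simp)]
    rfl
  | succ f ih =>
    intro c
    rw [PySem.List.pyRange_one_cons (by push_cast; omega)]
    simp only [pvARec, pvBScan]
    rw [if_pos hbase, pvSet_contains]
    have hrange : PySem.List.pyRange (c + 1) (c + ((f : Nat) + 1 : Nat)) 1
        = PySem.List.pyRange (c + 1) ((c + 1) + (f : Int)) 1 := by
      congr 1
      push_cast
      ring
    by_cases h : names.contains (PySem.Str.replace title part (name ++ (" (" ++ PySem.Int.toStr c ++ ")"))) = true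
    · simp only [String.append_assoc] at h ⊢
      rw [if_pos h, if_pos h, ih (c + 1), hrange]
    · simp only [String.append_assoc] at h ⊢
      rw [if_neg h, if_neg h]

-- ===== VERDICT =====
theorem recur_add_c_spec : Claim_equal_recur_add_c := by
  intro name names title part c _ _
  unfold Spec_recur_add_c recur_add_c recur_add_c_alt
  dsimp only
  by_cases hbase : names.contains (PySem.Str.replace title part name) = true
  · rw [pvSet_contains, if_pos hbase,
      pvARec_eq_pvBScan name names title part hbase (names.length + 2) c]
    norm_cast
  · have hb : PySem.Str.replace title part name ∉ names := by simpa using hbase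
    rw [pvSet_contains, if_neg (by simpa using hb)]
    simp [pvARec, hb]
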